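-- pv_equiv track=rewrite | github.com/thaybaldao/automatalovers | lab.py | grammarGenerator
-- ===== SOURCE A (Python) =====
-- rules = {"e": [["e", "a", "e"], ["(", "e", "a", "e", ")"], ["p", "(", "e", ")"], ["v"]],
--          "a": ["+", "-", "/", "*"],
--          "p": ["m.cos", "m.sin", "m.log", "m.sqrt"],
--          "v": ["x1", "x2", "x3", "x4", "x5", "x6", "x7", "x8"]}
--
-- def updateGrammar(term, j, k, grammar, crom):
--     if len(grammar) == 1 and term == "e":
--         grammar[j+1:j+1] = rules[term][crom[k]%(len(rules[term]) - 1)]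
--         del grammar[j]
--     elif grammar[j] == term:
--         grammar[j+1:j+1] = rules[term][crom[k]%len(rules[term])]
--         del grammar[j]
--     return grammar
--
-- def verifyEnd(grammar):
--     end = True
--     for i in range(0, len(grammar)):
--         if grammar[i] == "e" or grammar[i] == "p" or grammar[i] == "a" or grammar[i] == "v":
--             end = False
--             break
--     return end
--
-- def grammarGenerator(popul, numGrammarFormation):
--     grammarList = []
--     for i in range(0, len(popul)):
--         crom = popul[i]
--         grammar = ["e"]
--         p = 0
--         while not verifyEnd(grammar) and p < numGrammarFormation:
--             for k in range(0, len(crom)):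
--                 j = 0
--                 while j <len(grammar):
--                     if grammar[j] == "e" or grammar[j] == "p" or grammar[j] == "a" or grammar[j] == "v":
--                         break
--                     j += 1
--
--                 if j == len(grammar):
--                     break
--                 else:
--                     if grammar[j] == "e":
--                         grammar = updateGrammar("e", j, k, grammar, crom)
--                     elif grammar[j] == "a":
--                         grammar = updateGrammar("a", j, k, grammar, crom)
--                     elif grammar[j] == "v":
--                         grammar = updateGrammar("v", j, k, grammar, crom)
--                     elif grammar[j] == "p":
--                         grammar = updateGrammar("p", j, k, grammar, crom)
--             p +=1
--
--         grammarList.append(grammar)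
--     return grammarList
-- ===== SOURCE B (Python) =====
-- # B: zipper with a forward-only pointer -- terminals already emitted go to `prefix`,
-- # the remaining symbols live in `rrest` (stored reversed so the leftmost symbol is
-- # rrest[-1]); no verifyEnd rescans and no scans from index 0: asymptotically linear
-- # in the total expanded length instead of A's repeated left rescans.
-- rules = {"e": [["e", "a", "e"], ["(", "e", "a", "e", ")"], ["p", "(", "e", ")"], ["v"]],
--          "a": ["+", "-", "/", "*"],
--          "p": ["m.cos", "m.sin", "m.log", "m.sqrt"],
--          "v": ["x1", "x2", "x3", "x4", "x5", "x6", "x7", "x8"]}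
--
-- def grammarGenerator(popul, numGrammarFormation):
--     out = []
--     for crom in popul:
--         prefix = []        # terminals left of the leftmost nonterminal
--         rrest = ["e"]      # remaining symbols, reversed (leftmost = rrest[-1])
--         p = 0
--         while p < numGrammarFormation:
--             while rrest and rrest[-1] not in rules:
--                 prefix.append(rrest.pop())
--             if not rrest:
--                 break
--             for _k in range(len(crom)):
--                 while rrest and rrest[-1] not in rules:
--                     prefix.append(rrest.pop())
--                 if not rrest:
--                     break
--                 t = rrest[-1]
--                 if t == "e" and not prefix and len(rrest) == 1:
--                     repl = rules["e"][crom[_k] % 3]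
--                 else:
--                     repl = rules[t][crom[_k] % len(rules[t])]
--                 rrest.pop()
--                 rrest.extend(reversed(repl))
--             p += 1
--         out.append(prefix + rrest[::-1])
--     return out
-- ===== Notes on version B (the rewrite author's own statement) =====
-- stated objective: faster
-- what changed: Replaces A's per-step verifyEnd scan, leftmost-nonterminal rescan from index 0 and slice-insert+delete on one list by a zipper (emitted-terminal prefix + reversed rest) with a forward-only pointer, so each expansion costs O(production length) amortized.
import Mathlib
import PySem

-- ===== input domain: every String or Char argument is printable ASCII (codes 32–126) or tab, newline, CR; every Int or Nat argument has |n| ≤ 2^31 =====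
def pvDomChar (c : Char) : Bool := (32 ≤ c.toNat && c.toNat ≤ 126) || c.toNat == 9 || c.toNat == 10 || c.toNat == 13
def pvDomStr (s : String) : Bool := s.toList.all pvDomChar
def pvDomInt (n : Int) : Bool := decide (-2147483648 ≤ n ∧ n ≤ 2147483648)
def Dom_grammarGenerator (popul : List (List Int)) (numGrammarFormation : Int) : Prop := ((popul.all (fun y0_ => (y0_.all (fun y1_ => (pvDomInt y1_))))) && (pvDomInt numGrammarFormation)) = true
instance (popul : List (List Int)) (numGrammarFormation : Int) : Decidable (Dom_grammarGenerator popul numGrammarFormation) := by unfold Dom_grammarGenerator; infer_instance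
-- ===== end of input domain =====

-- B replaces A's verifyEnd/leftmost rescans by a forward-only zipper (objective: faster, asymptotic).

-- the module constant `rules` (string productions expanded to their characters, as
-- Python's slice assignment `grammar[j+1:j+1] = "m.cos"` inserts single characters)
def pvRulesE : List (List String) := [["e", "a", "e"], ["(", "e", "a", "e", ")"], ["p", "(", "e", ")"], ["v"]]
def pvRulesA : List String := ["+", "-", "/", "*"]
def pvRulesP : List String := ["m.cos", "m.sin", "m.log", "m.sqrt"]
def pvRulesV : List String := ["x1", "x2", "x3", "x4", "x5", "x6", "x7", "x8"]
-- the 1-character strings of s, as Python iterates a string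
def pvStrSyms (s : String) : List String := s.toList.map (fun ch => String.ofList [ch])
-- rules[term][c % len(rules[term])] as a list of symbols (term is one of the four keys)
def pvProdOf (term : String) (c : Int) : List String :=
  if term = "e" then pvRulesE.getD (PySem.Int.mod c 4).toNat []
  else if term = "a" then pvStrSyms (pvRulesA.getD (PySem.Int.mod c 4).toNat "")
  else if term = "p" then pvStrSyms (pvRulesP.getD (PySem.Int.mod c 4).toNat "")
  else pvStrSyms (pvRulesV.getD (PySem.Int.mod c 8).toNat "")

-- ===== PORT A =====
-- updateGrammar(term, j, k, grammar, crom) (c = crom[k]; slice-insert at j+1, then del grammar[j])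
def pvUpdateGrammar (term : String) (j : Nat) (c : Int) (grammar : List String) : List String :=
  if grammar.length = 1 ∧ term = "e" then
    ((grammar.take (j+1)) ++ pvRulesE.getD (PySem.Int.mod c 3).toNat [] ++ grammar.drop (j+1)).eraseIdx j
  else if grammar.getD j "" = term then
    ((grammar.take (j+1)) ++ pvProdOf term c ++ grammar.drop (j+1)).eraseIdx j
  else grammar

-- verifyEnd(grammar)
def pvVerifyEnd : List String → Bool
  | [] => true
  | s :: rest => if s = "e" || s = "p" || s = "a" || s = "v" then false else pvVerifyEnd rest

-- the inner `while j < len(grammar)` scan, accumulator j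
def pvFindJAux : List String → Nat → Nat
  | [], j => j
  | s :: rest, j => if s = "e" || s = "p" || s = "a" || s = "v" then j else pvFindJAux rest (j+1)

-- the `for k in range(0, len(crom))` body (iterating crom's elements in order)
def pvRoundA : List Int → List String → List String
  | [], g => g
  | c :: cs, g =>
    let j := pvFindJAux g 0
    if j = g.length then g
    else
      let t := g.getD j ""
      let g' := if t = "e" then pvUpdateGrammar "e" j c g
                else if t = "a" then pvUpdateGrammar "a" j c g
                else if t = "v" then pvUpdateGrammar "v" j c g
                else if t = "p" then pvUpdateGrammar "p" j c g
                else g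
      pvRoundA cs g'

-- the `while not verifyEnd(grammar) and p < numGrammarFormation` loop (fuel bounds p's climb to num)
def pvLoopA (crom : List Int) (num : Int) : Int → Nat → List String → List String
  | _, 0, g => g
  | p, fuel+1, g =>
    if pvVerifyEnd g = false ∧ p < num then pvLoopA crom num (p+1) fuel (pvRoundA crom g) else g

def grammarGenerator (popul : List (List Int)) (numGrammarFormation : Int) : List (List String) :=
  popul.map (fun crom => pvLoopA crom numGrammarFormation 0 numGrammarFormation.toNat ["e"])

-- ===== PORT B =====
-- `t in rules` (key membership)
def pvIsNT (s : String) : Bool := s = "e" || s = "a" || s = "p" || s = "v"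

-- move terminals from the rest onto the prefix until the head is a nonterminal
def pvAdvance (pre : List String) : List String → List String × List String
  | [] => (pre, [])
  | s :: rest => if pvIsNT s then (pre, s :: rest) else pvAdvance (s :: pre) rest

-- B's `for _k in range(len(crom))` body on the zipper
def pvRoundB : List Int → List String × List String → List String × List String
  | [], st => st
  | c :: cs, st =>
    match pvAdvance st.1 st.2 with
    | (pre, []) => (pre, [])
    | (pre, t :: rs) =>
      let repl := if t = "e" ∧ pre = [] ∧ rs = [] then pvRulesE.getD (PySem.Int.mod c 3).toNat []
                  else pvProdOf t c
      pvRoundB cs (pre, repl ++ rs)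

-- B's `while p < numGrammarFormation` loop
def pvLoopB (crom : List Int) (num : Int) : Int → Nat → List String × List String → List String × List String
  | _, 0, st => st
  | p, fuel+1, st =>
    if p < num then
      match pvAdvance st.1 st.2 with
      | (pre, []) => (pre, [])
      | (pre, t :: rs) => pvLoopB crom num (p+1) fuel (pvRoundB crom (pre, t :: rs))
    else st

def grammarGenerator_alt (popul : List (List Int)) (numGrammarFormation : Int) : List (List String) :=
  popul.map (fun crom =>
    let st := pvLoopB crom numGrammarFormation 0 numGrammarFormation.toNat ([], ["e"])
    st.1.reverse ++ st.2)

-- ===== PRECONDITION & SPEC =====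
def Spec_grammarGenerator (popul : List (List Int)) (numGrammarFormation : Int) (out : List (List String)) : Prop := out = grammarGenerator_alt popul numGrammarFormation
instance (popul : List (List Int)) (numGrammarFormation : Int) (out : List (List String)) : Decidable (Spec_grammarGenerator popul numGrammarFormation out) := by unfold Spec_grammarGenerator; infer_instance

-- ===== CLAIM (what is proved, stated in full; the proofs are below) =====
def Claim_equal_grammarGenerator : Prop := ∀ (popul : List (List Int)) (numGrammarFormation : Int), Dom_grammarGenerator popul numGrammarFormation → Spec_grammarGenerator popul numGrammarFormation (grammarGenerator popul numGrammarFormation)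

-- ===== LEMMAS AND PROOFS =====

lemma adv_concat : ∀ (rest pre : List String),
    (pvAdvance pre rest).1.reverse ++ (pvAdvance pre rest).2 = pre.reverse ++ rest := by
  intro rest
  induction rest with
  | nil => intro pre; simp [pvAdvance]
  | cons s rs ih =>
    intro pre
    by_cases h : pvIsNT s = true
    · simp [pvAdvance, h]
    · simp only [pvAdvance, Bool.not_eq_true] at h ⊢
      rw [h]; simp [ih (s :: pre)]

lemma adv_pre_nont : ∀ (rest pre : List String), (∀ s ∈ pre, pvIsNT s = false) →
    ∀ s ∈ (pvAdvance pre rest).1, pvIsNT s = false := by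
  intro rest
  induction rest with
  | nil => intro pre h; simpa [pvAdvance] using h
  | cons s rs ih =>
    intro pre h
    by_cases hs : pvIsNT s = true
    · simpa [pvAdvance, hs] using h
    · simp only [pvAdvance, Bool.not_eq_true] at hs ⊢
      rw [hs]
      refine ih (s :: pre) ?_
      intro x hx
      rcases List.mem_cons.mp hx with hx | hx
      · subst hx; exact hs
      · exact h x hx

lemma adv_head : ∀ (rest pre : List String),
    (pvAdvance pre rest).2 = [] ∨ ∃ t rs, (pvAdvance pre rest).2 = t :: rs ∧ pvIsNT t = true := by
  intro rest
  induction rest with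
  | nil => intro pre; left; simp [pvAdvance]
  | cons s rs ih =>
    intro pre
    by_cases hs : pvIsNT s = true
    · right; exact ⟨s, rs, by simp [pvAdvance, hs], hs⟩
    · simp only [pvAdvance, Bool.not_eq_true] at hs ⊢
      rw [hs]; exact ih (s :: pre)

lemma adv_verify : ∀ (rest pre : List String),
    pvVerifyEnd (pvAdvance pre rest).2 = pvVerifyEnd rest := by
  intro rest
  induction rest with
  | nil => intro pre; simp [pvAdvance]
  | cons s rs ih =>
    intro pre
    by_cases hs : pvIsNT s = true
    · simp [pvAdvance, hs]
    · simp only [Bool.not_eq_true] at hs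
      simp only [pvAdvance, hs, Bool.false_eq_true, if_false]
      rw [ih (s :: pre)]
      simp only [pvVerifyEnd]
      have : (s = "e" || s = "p" || s = "a" || s = "v") = false := by
        simp only [pvIsNT] at hs
        cases h1 : decide (s = "e") <;> cases h2 : decide (s = "p") <;>
          cases h3 : decide (s = "a") <;> cases h4 : decide (s = "v") <;>
          simp_all
      rw [this]; simp

lemma nt_iff (s : String) : (s = "e" || s = "p" || s = "a" || s = "v") = pvIsNT s := by
  simp only [pvIsNT]
  cases h1 : decide (s = "e") <;> cases h2 : decide (s = "p") <;>
    cases h3 : decide (s = "a") <;> cases h4 : decide (s = "v") <;> simp_all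

lemma verify_prefix : ∀ (l1 l2 : List String), (∀ s ∈ l1, pvIsNT s = false) →
    pvVerifyEnd (l1 ++ l2) = pvVerifyEnd l2 := by
  intro l1
  induction l1 with
  | nil => intro l2 _; rfl
  | cons s rs ih =>
    intro l2 h
    have hs : pvIsNT s = false := h s (by simp)
    simp only [List.cons_append, pvVerifyEnd, nt_iff, hs]
    exact ih l2 (fun x hx => h x (by simp [hx]))

lemma verify_nt_head (t : String) (rs : List String) (h : pvIsNT t = true) :
    pvVerifyEnd (t :: rs) = false := by
  simp [pvVerifyEnd, nt_iff, h]

lemma findJ_prefix : ∀ (l1 : List String), (∀ s ∈ l1, pvIsNT s = false) →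
    ∀ (l2 : List String) (j : Nat), pvFindJAux (l1 ++ l2) j = pvFindJAux l2 (j + l1.length) := by
  intro l1
  induction l1 with
  | nil => intro _ l2 j; simp
  | cons s rs ih =>
    intro h l2 j
    have hs : pvIsNT s = false := h s (by simp)
    simp only [List.cons_append, pvFindJAux, nt_iff, hs, if_neg Bool.false_ne_true]
    rw [ih (fun x hx => h x (by simp [hx])) l2 (j+1)]
    simp only [List.length_cons]
    congr 1
    omega

lemma findJ_nt_head (t : String) (rs : List String) (j : Nat) (h : pvIsNT t = true) :
    pvFindJAux (t :: rs) j = j := by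
  simp [pvFindJAux, nt_iff, h]

lemma getD_pref : ∀ (P : List String) (t : String) (rs : List String),
    (P ++ t :: rs).getD P.length "" = t := by
  intro P
  induction P with
  | nil => intro t rs; rfl
  | cons a P' ih => intro t rs; simpa using ih t rs

lemma splice_eq : ∀ (P : List String) (t : String) (rs prod : List String),
    (((P ++ t :: rs).take (P.length+1)) ++ prod ++ (P ++ t :: rs).drop (P.length+1)).eraseIdx P.length
      = P ++ (prod ++ rs) := by
  intro P
  induction P with
  | nil => intro t rs prod; simp
  | cons a P' ih =>
    intro t rs prod
    simpa [List.eraseIdx_cons_succ] using ih t rs prod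

lemma nt_cases (t : String) (h : pvIsNT t = true) : t = "e" ∨ t = "a" ∨ t = "p" ∨ t = "v" := by
  simp only [pvIsNT, Bool.or_eq_true, decide_eq_true_eq] at h
  tauto

-- the dispatched update at the leftmost nonterminal equals B's one-shot replacement
lemma step_eq (t : String) (c : Int) (pre rs : List String) (hnt : pvIsNT t = true) :
    (if t = "e" then pvUpdateGrammar "e" pre.reverse.length c (pre.reverse ++ t :: rs)
     else if t = "a" then pvUpdateGrammar "a" pre.reverse.length c (pre.reverse ++ t :: rs)
     else if t = "v" then pvUpdateGrammar "v" pre.reverse.length c (pre.reverse ++ t :: rs)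
     else if t = "p" then pvUpdateGrammar "p" pre.reverse.length c (pre.reverse ++ t :: rs)
     else pre.reverse ++ t :: rs)
    = pre.reverse ++ ((if t = "e" ∧ pre = [] ∧ rs = [] then pvRulesE.getD (PySem.Int.mod c 3).toNat []
                       else pvProdOf t c) ++ rs) := by
  have hget : (pre.reverse ++ t :: rs).getD pre.reverse.length "" = t := getD_pref _ t rs
  have hone : ((pre.reverse ++ t :: rs).length = 1) ↔ (pre = [] ∧ rs = []) := by
    constructor
    · intro h
      simp only [List.length_append, List.length_reverse, List.length_cons] at h
      exact ⟨List.eq_nil_of_length_eq_zero (by omega), List.eq_nil_of_length_eq_zero (by omega)⟩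
    · rintro ⟨h1, h2⟩; subst h1; subst h2; rfl
  rcases nt_cases t hnt with h | h | h | h
  · subst h
    rw [if_pos rfl]
    unfold pvUpdateGrammar
    by_cases hsp : pre = [] ∧ rs = []
    · rw [if_pos ⟨hone.2 hsp, rfl⟩, if_pos ⟨rfl, hsp.1, hsp.2⟩]
      exact splice_eq pre.reverse "e" rs _
    · rw [if_neg (fun hc => hsp (hone.1 hc.1)), if_pos hget,
          if_neg (fun hc => hsp hc.2)]
      exact splice_eq pre.reverse "e" rs _
  · subst h
    rw [if_neg (by decide), if_pos rfl]
    unfold pvUpdateGrammar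
    rw [if_neg (fun hc => absurd hc.2 (by decide)), if_pos hget,
        if_neg (fun hc => absurd hc.1 (by decide))]
    exact splice_eq pre.reverse "a" rs _
  · subst h
    rw [if_neg (by decide), if_neg (by decide), if_neg (by decide), if_pos rfl]
    unfold pvUpdateGrammar
    rw [if_neg (fun hc => absurd hc.2 (by decide)), if_pos hget,
        if_neg (fun hc => absurd hc.1 (by decide))]
    exact splice_eq pre.reverse "p" rs _
  · subst h
    rw [if_neg (by decide), if_neg (by decide), if_pos rfl]
    unfold pvUpdateGrammar
    rw [if_neg (fun hc => absurd hc.2 (by decide)), if_pos hget,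
        if_neg (fun hc => absurd hc.1 (by decide))]
    exact splice_eq pre.reverse "v" rs _

lemma pvRound_eq : ∀ (cs : List Int) (pre rest : List String), (∀ s ∈ pre, pvIsNT s = false) →
    pvRoundA cs (pre.reverse ++ rest)
      = (pvRoundB cs (pre, rest)).1.reverse ++ (pvRoundB cs (pre, rest)).2
    ∧ (∀ s ∈ (pvRoundB cs (pre, rest)).1, pvIsNT s = false) := by
  intro cs
  induction cs with
  | nil => intro pre rest h; exact ⟨rfl, h⟩
  | cons c cs' ih =>
    intro pre rest h
    obtain ⟨pre2, rest2, hadv⟩ : ∃ a b, pvAdvance pre rest = (a, b) :=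
      ⟨_, _, rfl⟩
    have hcat : pre2.reverse ++ rest2 = pre.reverse ++ rest := by
      have := adv_concat rest pre; rw [hadv] at this; simpa using this
    have hpre2 : ∀ s ∈ pre2, pvIsNT s = false := by
      have := adv_pre_nont rest pre h; rw [hadv] at this; simpa using this
    rcases (by have := adv_head rest pre; rw [hadv] at this; simpa using this :
        rest2 = [] ∨ ∃ t rs, rest2 = t :: rs ∧ pvIsNT t = true) with hr | ⟨t, rs, hr, hnt⟩
    · -- no nonterminal left: A's scan hits the end and the round is a no-op
      subst hr
      have hg : pre.reverse ++ rest = pre2.reverse := by rw [← hcat]; simp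
      constructor
      · rw [hg]
        simp only [pvRoundA]
        have hfind : pvFindJAux pre2.reverse 0 = pre2.reverse.length := by
          have := findJ_prefix pre2.reverse (by simpa using hpre2) [] 0
          simp only [List.append_nil, pvFindJAux] at this
          omega
        rw [if_pos hfind]
        simp [pvRoundB, hadv]
      · simpa [pvRoundB, hadv] using hpre2
    · subst hr
      have hg : pre.reverse ++ rest = pre2.reverse ++ t :: rs := hcat.symm
      have hfind : pvFindJAux (pre2.reverse ++ t :: rs) 0 = pre2.reverse.length := by
        rw [findJ_prefix pre2.reverse (by simpa using hpre2) _ 0, findJ_nt_head t rs _ hnt]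
        omega
      have hlen : pvFindJAux (pre2.reverse ++ t :: rs) 0 ≠ (pre2.reverse ++ t :: rs).length := by
        rw [hfind]; simp
      have hstep := step_eq t c pre2 rs hnt
      constructor
      · rw [hg]
        simp only [pvRoundA]
        rw [if_neg hlen]
        simp only [hfind, getD_pref pre2.reverse t rs, hstep]
        simp only [pvRoundB, hadv]
        exact (ih pre2 _ hpre2).1
      · simp only [pvRoundB, hadv]
        exact (ih pre2 _ hpre2).2

lemma loop_eq : ∀ (fuel : Nat) (crom : List Int) (num p : Int) (pre rest : List String),
    (∀ s ∈ pre, pvIsNT s = false) →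
    pvLoopA crom num p fuel (pre.reverse ++ rest)
      = (pvLoopB crom num p fuel (pre, rest)).1.reverse ++ (pvLoopB crom num p fuel (pre, rest)).2 := by
  intro fuel
  induction fuel with
  | zero => intro crom num p pre rest _; rfl
  | succ fuel ih =>
    intro crom num p pre rest h
    obtain ⟨pre2, rest2, hadv⟩ : ∃ a b, pvAdvance pre rest = (a, b) := ⟨_, _, rfl⟩
    have hcat : pre2.reverse ++ rest2 = pre.reverse ++ rest := by
      have := adv_concat rest pre; rw [hadv] at this; simpa using this
    have hpre2 : ∀ s ∈ pre2, pvIsNT s = false := by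
      have := adv_pre_nont rest pre h; rw [hadv] at this; simpa using this
    have hver : pvVerifyEnd (pre.reverse ++ rest) = pvVerifyEnd rest2 := by
      rw [verify_prefix pre.reverse rest (by simpa using h)]
      have := adv_verify rest pre; rw [hadv] at this; exact this.symm
    by_cases hp : p < num
    · rcases (by have := adv_head rest pre; rw [hadv] at this; simpa using this :
          rest2 = [] ∨ ∃ t rs, rest2 = t :: rs ∧ pvIsNT t = true) with hr | ⟨t, rs, hr, hnt⟩
      · subst hr
        have : pvVerifyEnd (pre.reverse ++ rest) = true := by rw [hver]; rfl
        simp only [pvLoopA, pvLoopB, this, hadv, hp]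
        simp only [reduceIte]
        rw [← hcat]; simp
      · subst hr
        have hvf : pvVerifyEnd (pre.reverse ++ rest) = false := by
          rw [hver]; exact verify_nt_head t rs hnt
        simp only [pvLoopA, pvLoopB, hadv, if_pos hp, if_pos (And.intro hvf hp)]
        have hround := pvRound_eq crom pre2 (t :: rs) hpre2
        have hgr : pre.reverse ++ rest = pre2.reverse ++ t :: rs := hcat.symm
        rw [hgr, hround.1]
        obtain ⟨p3, r3, hrb⟩ : ∃ a b, pvRoundB crom (pre2, t :: rs) = (a, b) := ⟨_, _, rfl⟩
        rw [hrb] at hround ⊢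
        exact ih crom num (p+1) p3 r3 hround.2
    · simp only [pvLoopA, pvLoopB, if_neg hp]
      rw [if_neg (by rintro ⟨_, hc⟩; exact hp hc)]

-- ===== VERDICT (by name: the statement is the Claim_ definition above) =====
theorem grammarGenerator_spec : Claim_equal_grammarGenerator := by
  intro popul num _
  unfold Spec_grammarGenerator grammarGenerator grammarGenerator_alt
  apply List.map_congr_left
  intro crom _
  have := loop_eq num.toNat crom num 0 [] ["e"] (by intro s hs; simp at hs)
  simpa using this
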